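-- pv_equiv track=rewrite | github.com/MOMOKO606/CLRS_Code_in_Python | chapter_6.py | heap_change_key_beta
-- ===== SOURCE A (Python) =====
-- import math
--
-- def parent( i ):
--     #  i >> 1 equals to i // 2
--     #  >> is bit operation which means move x digit(s) to the right.
--     #  i >> 1 will first transfer i to binary format, then move one digit to the right.
--     # "move one digit to the right" means "i // 2".
--     # "move n digits to the right" means "i // 2 ^ n", e.g. 1024 >> 10 is 1.
--     return i - 1 >> 1
--
-- def left( i ):
--     #  i << 1 equals to i * 2
--     #  << is bit operation which means move x digit(s) to the left.
--     #  i << 1 will first transfer i to binary format, then move one digit to the left.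
--     # "move one digit to the left" means "i * 2".
--     # "move n digits to the right" means "i * 2 ^ n", e.g. 1 << 10 is 1024.
--     return (i << 1) + 1
--
-- def right( i ):
--     #  i << 1 equals to i * 2
--     #  << is bit operation which means move x digit(s) to the left.
--     #  i << 1 will first transfer i to binary format, then move one digit to the left.
--     # "move one digit to the left" means "i * 2".
--     # "move n digits to the right" means "i * 2 ^ n", e.g. 1 << 10 is 1024.
--     return i + 1 << 1
--
-- def exchange( x, y ):
--     x = x + y  # now x = the sum of x & y
--     y = x - y  # now y = sum - y = the original x
--     x = x - y  # now x = sum - y = sum - the original x = the original y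
--     return x, y
--
-- def max_heapify( A, i, heap_size ):
--
--     #  Set sentinel
--     if i >= math.ceil( heap_size / 2 ):
--         return A
--
--     left_index = left(i)
--     right_index = right(i)
--
--     #  Find the largest index in i, left_index and right_index
--     if left_index < heap_size and A[left_index] > A[i]:
--         largest = left_index
--     else: largest = i
--
--     if right_index < heap_size and A[right_index] > A[largest]:
--         largest = right_index
--
--     #  Fix the node that doesn't obey to heap rule.
--     if largest != i:
--         #  the pythonic way is A[largest], A[i] =  A[i], A[largest]
--         A[largest], A[i] = exchange( A[largest], A[i] )
--         #  recursively check the nodes below.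
--         max_heapify(A, largest, heap_size)
--
--     return A
--
-- def heap_change_key_beta( A, i, key, heap_size ):
--
--     #  Decrease key.
--     if key <= A[i]:
--
--         A[i] = key
--         #  Top-bottom fixing.
--         max_heapify(A, i, heap_size)
--
--     else:  #  Increase key
--
--         while i > 0 and A[parent(i)] < key:
--             A[i] = A[parent(i)]
--             #  Update the index.
--             i = parent(i)
--
--         A[i] = key
--
--     return A
-- ===== SOURCE B (Python) =====
-- def heap_change_key_beta(A, i, key, heap_size):
--     if key <= A[i]:
--         #  Decrease key: write it and sift down iteratively.
--         A[i] = key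
--         j = i
--         while True:
--             l = 2 * j + 1
--             r = 2 * j + 2
--             m = j
--             if l < heap_size and A[l] > A[m]:
--                 m = l
--             if r < heap_size and A[r] > A[m]:
--                 m = r
--             if m == j:
--                 break
--             A[j], A[m] = A[m], A[j]
--             j = m
--     else:
--         #  Increase key: bubble up.
--         while i > 0 and A[(i - 1) // 2] < key:
--             A[i] = A[(i - 1) // 2]
--             i = (i - 1) // 2
--         A[i] = key
--     return A
-- ===== Notes on version B (the rewrite author's own statement) =====
-- stated objective: alternative
-- what changed: Replaces the recursive max_heapify with its ceil-sentinel, helper index functions and arithmetic-trick exchange by a single self-contained iterative sift-down loop with inlined child indices and a plain tuple swap (the bubble-up loop is kept, with parent() inlined).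
-- outside the precondition, e.g. on heap_change_key_beta([5, 3], -1, 10, 2): A returns [5, 10], B returns [5, 10]; on heap_change_key_beta([3, 1, 2], 0, 0, 5): A returns [2, 1, 0], B returns [2, 1, 0]
import Mathlib
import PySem

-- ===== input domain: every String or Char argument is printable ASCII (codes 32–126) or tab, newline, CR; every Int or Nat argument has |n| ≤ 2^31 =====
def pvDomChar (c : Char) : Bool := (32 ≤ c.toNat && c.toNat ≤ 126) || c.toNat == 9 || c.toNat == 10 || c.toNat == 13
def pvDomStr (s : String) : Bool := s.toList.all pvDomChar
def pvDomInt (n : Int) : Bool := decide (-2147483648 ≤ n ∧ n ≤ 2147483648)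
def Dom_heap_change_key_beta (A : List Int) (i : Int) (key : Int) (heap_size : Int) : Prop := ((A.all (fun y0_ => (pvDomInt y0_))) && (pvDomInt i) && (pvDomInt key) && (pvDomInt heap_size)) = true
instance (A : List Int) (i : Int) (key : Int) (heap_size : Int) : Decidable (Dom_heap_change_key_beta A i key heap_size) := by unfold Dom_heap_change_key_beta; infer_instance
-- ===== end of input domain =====

-- B replaces A's recursive max_heapify (ceil sentinel, parent/left/right helpers, arithmetic-trick
-- exchange) by one self-contained iterative sift-down loop with inlined indices and a tuple swap
-- (objective: alternative decomposition, same cost). Both Pythons mutate A in place; the claim is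
-- about the returned list (both perform the same mutations on Pre_).

-- ===== PORT A =====
-- parent(i): 'i - 1 >> 1' (Python >> is Lean's >>> on Int)
def pvParent (i : Int) : Int := (i - 1) >>> (1 : Nat)
-- left(i): '(i << 1) + 1'
def pvLeft (i : Int) : Int := (i <<< (1 : Nat)) + 1
-- right(i): 'i + 1 << 1'
def pvRight (i : Int) : Int := (i + 1) <<< (1 : Nat)
-- exchange(x, y): the three arithmetic reassignments, step for step
def pvExchange (x y : Int) : Int × Int :=
  let x1 := x + y
  let y1 := x1 - y
  let x2 := x1 - y1
  (x2, y1)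
-- math.ceil(heap_size / 2) = -((-heap_size) // 2): exact on Dom (|heap_size| ≤ 2^31 < 2^53)
def pvCeilHalf (heap_size : Int) : Int := -(PySem.Int.floordiv (-heap_size) 2)

-- max_heapify(A, i, heap_size); fuel is only a totality guard (heap_size.toNat + 1 suffices:
-- the recursion index strictly increases and stays below heap_size)
def pvMaxHeapifyA : Nat → List Int → Int → Int → List Int
  | 0, A, _, _ => A
  | fuel + 1, A, i, heap_size =>
    if i ≥ pvCeilHalf heap_size then A
    else
      let left_index := pvLeft i
      let right_index := pvRight i
      let largest0 := if left_index < heap_size ∧ PySem.List.pyGetD A left_index 0 > PySem.List.pyGetD A i 0 then left_index else i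
      let largest := if right_index < heap_size ∧ PySem.List.pyGetD A right_index 0 > PySem.List.pyGetD A largest0 0 then right_index else largest0
      if largest ≠ i then
        let p := pvExchange (PySem.List.pyGetD A largest 0) (PySem.List.pyGetD A i 0)
        pvMaxHeapifyA fuel (PySem.List.pySetD (PySem.List.pySetD A largest p.1) i p.2) largest heap_size
      else A

-- the 'while i > 0 and A[parent(i)] < key' loop, then 'A[i] = key'; fuel i.toNat + 1 suffices
-- (i strictly decreases and stays nonnegative)
def pvBubbleA : Nat → List Int → Int → Int → List Int
  | 0, A, i, key => PySem.List.pySetD A i key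
  | fuel + 1, A, i, key =>
    if i > 0 ∧ PySem.List.pyGetD A (pvParent i) 0 < key then
      pvBubbleA fuel (PySem.List.pySetD A i (PySem.List.pyGetD A (pvParent i) 0)) (pvParent i) key
    else PySem.List.pySetD A i key

def heap_change_key_beta (A : List Int) (i : Int) (key : Int) (heap_size : Int) : List Int :=
  if key ≤ PySem.List.pyGetD A i 0 then
    pvMaxHeapifyA (heap_size.toNat + 1) (PySem.List.pySetD A i key) i heap_size
  else
    pvBubbleA (i.toNat + 1) A i key

-- ===== PORT B =====
-- the 'while True' sift-down loop of Source B; fuel is only a totality guard (heap_size.toNat + 1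
-- suffices: j strictly increases and stays below heap_size)
def pvSiftB : Nat → List Int → Int → Int → List Int
  | 0, A, _, _ => A
  | fuel + 1, A, j, heap_size =>
    let l := 2 * j + 1
    let r := 2 * j + 2
    let m0 := if l < heap_size ∧ PySem.List.pyGetD A l 0 > PySem.List.pyGetD A j 0 then l else j
    let m := if r < heap_size ∧ PySem.List.pyGetD A r 0 > PySem.List.pyGetD A m0 0 then r else m0
    if m = j then A
    else pvSiftB fuel (PySem.List.pySetD (PySem.List.pySetD A j (PySem.List.pyGetD A m 0)) m (PySem.List.pyGetD A j 0)) m heap_size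

-- Source B's bubble-up loop with (i - 1) // 2 inlined; fuel i.toNat + 1 suffices
def pvBubbleB : Nat → List Int → Int → Int → List Int
  | 0, A, i, key => PySem.List.pySetD A i key
  | fuel + 1, A, i, key =>
    if i > 0 ∧ PySem.List.pyGetD A (PySem.Int.floordiv (i - 1) 2) 0 < key then
      pvBubbleB fuel (PySem.List.pySetD A i (PySem.List.pyGetD A (PySem.Int.floordiv (i - 1) 2) 0)) (PySem.Int.floordiv (i - 1) 2) key
    else PySem.List.pySetD A i key

def heap_change_key_beta_alt (A : List Int) (i : Int) (key : Int) (heap_size : Int) : List Int :=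
  if key ≤ PySem.List.pyGetD A i 0 then
    pvSiftB (heap_size.toNat + 1) (PySem.List.pySetD A i key) i heap_size
  else
    pvBubbleB (i.toNat + 1) A i key

-- ===== PRECONDITION & SPEC =====
-- Pre_ restricts to valid heap states: 0 ≤ i < len(A) and heap_size ≤ len(A). Outside it Python A
-- either raises IndexError (i out of range, or a child index below heap_size but beyond the list),
-- or returns a value via negative-index wraparound / oversized heap_size, which is accidental for a
-- heap routine and not part of its contract.
def Pre_heap_change_key_beta (A : List Int) (i : Int) (key : Int) (heap_size : Int) : Prop :=
  0 ≤ i ∧ i < (A.length : Int) ∧ heap_size ≤ (A.length : Int)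
instance (A : List Int) (i : Int) (key : Int) (heap_size : Int) : Decidable (Pre_heap_change_key_beta A i key heap_size) := by unfold Pre_heap_change_key_beta; infer_instance
def pvWitness_heap_change_key_beta : List Int × Int × Int × Int := ([9, 5, 7, 1], 1, 8, 4)

def Spec_heap_change_key_beta (A : List Int) (i : Int) (key : Int) (heap_size : Int) (out : List Int) : Prop := out = heap_change_key_beta_alt A i key heap_size
instance (A : List Int) (i : Int) (key : Int) (heap_size : Int) (out : List Int) : Decidable (Spec_heap_change_key_beta A i key heap_size out) := by unfold Spec_heap_change_key_beta; infer_instance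

-- ===== CLAIM (what is proved, stated in full; the proofs are below) =====
def Claim_equal_heap_change_key_beta : Prop := ∀ (A : List Int) (i : Int) (key : Int) (heap_size : Int), Dom_heap_change_key_beta A i key heap_size → Pre_heap_change_key_beta A i key heap_size → Spec_heap_change_key_beta A i key heap_size (heap_change_key_beta A i key heap_size)

-- ===== LEMMAS AND PROOFS =====

theorem pvLeft_eq (i : Int) : pvLeft i = 2 * i + 1 := by
  simp [pvLeft, Int.shiftLeft_eq]; ring

theorem pvRight_eq (i : Int) : pvRight i = 2 * i + 2 := by
  simp [pvRight, Int.shiftLeft_eq]; ring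

theorem pvParent_eq (i : Int) : pvParent i = PySem.Int.floordiv (i - 1) 2 := by
  rw [pvParent, PySem.Int.floordiv_eq_ediv_of_pos (by omega), Int.shiftRight_eq_div_pow]
  norm_num

theorem pvExchange_eq (x y : Int) : pvExchange x y = (y, x) := by
  simp only [pvExchange, Prod.mk.injEq]
  omega

theorem pvCeilHalf_ge (heap_size : Int) : heap_size ≤ 2 * pvCeilHalf heap_size := by
  rw [pvCeilHalf, PySem.Int.floordiv_eq_ediv_of_pos (by omega)]
  omega

theorem pySetD_swap_comm (A : List Int) (p q x y : Int) (hp : 0 ≤ p) (hq : 0 ≤ q) (hne : p ≠ q) :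
    PySem.List.pySetD (PySem.List.pySetD A p x) q y = PySem.List.pySetD (PySem.List.pySetD A q y) p x := by
  simp only [PySem.List.pySetD_of_nonneg _ _ hp, PySem.List.pySetD_of_nonneg _ _ hq]
  rw [List.set_comm]
  omega

theorem pvBubble_eq (fuel : Nat) (A : List Int) (i key : Int) :
    pvBubbleA fuel A i key = pvBubbleB fuel A i key := by
  induction fuel generalizing A i with
  | zero => rfl
  | succ fuel ih =>
    simp only [pvBubbleA, pvBubbleB, pvParent_eq]
    split_ifs with h
    · exact ih _ _
    · rfl

theorem pvSift_eq (fuel : Nat) (A : List Int) (i heap_size : Int) (hi : 0 ≤ i) :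
    pvMaxHeapifyA fuel A i heap_size = pvSiftB fuel A i heap_size := by
  induction fuel generalizing A i with
  | zero => rfl
  | succ fuel ih =>
    have hceil := pvCeilHalf_ge heap_size
    simp only [pvMaxHeapifyA, pvSiftB, pvLeft_eq, pvRight_eq, pvExchange_eq]
    by_cases hs1 : i ≥ pvCeilHalf heap_size
    · -- sentinel case: both children are out of the heap, B's loop also stops
      have hl : ¬ (2 * i + 1 < heap_size ∧ PySem.List.pyGetD A (2 * i + 1) 0 > PySem.List.pyGetD A i 0) := by
        intro ⟨h1, _⟩; omega
      have hr : ¬ (2 * i + 2 < heap_size ∧ PySem.List.pyGetD A (2 * i + 2) 0 > PySem.List.pyGetD A i 0) := by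
        intro ⟨h1, _⟩; omega
      rw [if_pos hs1, if_neg hl, if_neg hr, if_pos rfl]
    · rw [if_neg hs1]
      -- both sides now compute the same 'largest' index
      set lg := (if 2 * i + 2 < heap_size ∧ PySem.List.pyGetD A (2 * i + 2) 0 > PySem.List.pyGetD A (if 2 * i + 1 < heap_size ∧ PySem.List.pyGetD A (2 * i + 1) 0 > PySem.List.pyGetD A i 0 then 2 * i + 1 else i) 0 then 2 * i + 2 else (if 2 * i + 1 < heap_size ∧ PySem.List.pyGetD A (2 * i + 1) 0 > PySem.List.pyGetD A i 0 then 2 * i + 1 else i)) with hlg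
      have hcases : lg = 2 * i + 2 ∨ lg = 2 * i + 1 ∨ lg = i := by
        rw [hlg]; split_ifs <;> simp
      by_cases heq : lg = i
      · rw [if_neg (fun h => h heq), if_pos heq]
      · rw [if_pos heq, if_neg heq]
        rw [pySetD_swap_comm A lg i _ _ (by omega) hi heq]
        exact ih _ _ (by omega)

-- ===== VERDICT (by name: the statement is the Claim_ definition above) =====
theorem heap_change_key_beta_spec : Claim_equal_heap_change_key_beta := by
  intro A i key heap_size _ hpre
  obtain ⟨hi, _, _⟩ := hpre
  unfold Spec_heap_change_key_beta heap_change_key_beta heap_change_key_beta_alt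
  by_cases hk : key ≤ PySem.List.pyGetD A i 0
  · rw [if_pos hk, if_pos hk]
    exact pvSift_eq _ _ _ _ hi
  · rw [if_neg hk, if_neg hk]
    exact pvBubble_eq _ _ _ _
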